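-- pv_equiv track=rewrite | github.com/Avikalp7/PyAlgos | heaps.py | check_list_min_heap
-- ===== SOURCE A (Python) =====
-- from math import floor
--
-- def check_list_min_heap(l):
-- 	"""
-- 	Given list l, determine if it qualifies as a binary min-heap
-- 	Return True/False
-- 	Time Complexity: O(n)
-- 	"""
-- 	answer = True
-- 	for current_pos in range(int(floor(len(l)/2))):
-- 		left_child = l[2*current_pos + 1]
-- 		right_child = l[2*current_pos + 2] if 2*current_pos + 2 < len(l) else None
-- 		if l[current_pos] > left_child or (right_child is not None and l[current_pos] > right_child):
-- 			answer = False
-- 			break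
-- 	return answer
-- ===== SOURCE B (Python) =====
-- def check_list_min_heap(l):
-- 	"""
-- 	Given list l, determine if it qualifies as a binary min-heap
-- 	Return True/False
-- 	Recursive depth-first check of the implicit tree rooted at index 0.
-- 	"""
-- 	n = len(l)
--
-- 	def ok(i):
-- 		left = 2 * i + 1
-- 		if left < n:
-- 			if l[i] > l[left] or not ok(left):
-- 				return False
-- 			right = left + 1
-- 			if right < n and (l[i] > l[right] or not ok(right)):
-- 				return False
-- 		return True
--
-- 	return ok(0)
-- ===== Notes on version B (the rewrite author's own statement) =====
-- stated objective: alternative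
-- what changed: B verifies the heap property by a recursive depth-first descent over the implicit binary tree (validate node, then recurse into left and right subtrees), instead of A's flat iterative scan over parent positions with a None-guarded right-child fetch and an answer flag.
import Mathlib
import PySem

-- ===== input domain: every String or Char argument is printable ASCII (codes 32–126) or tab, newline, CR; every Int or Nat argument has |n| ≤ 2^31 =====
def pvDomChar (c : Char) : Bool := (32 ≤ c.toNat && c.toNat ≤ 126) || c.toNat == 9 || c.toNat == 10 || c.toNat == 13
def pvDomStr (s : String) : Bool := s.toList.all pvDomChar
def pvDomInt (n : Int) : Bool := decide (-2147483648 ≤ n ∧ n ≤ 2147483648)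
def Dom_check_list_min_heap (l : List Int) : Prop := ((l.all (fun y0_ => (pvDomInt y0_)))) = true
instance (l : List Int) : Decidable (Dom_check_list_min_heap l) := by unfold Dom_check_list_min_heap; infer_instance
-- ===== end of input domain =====

-- B checks the heap property by recursive depth-first descent over the implicit tree,
-- instead of A's flat iterative scan over parent positions (same cost).

-- ===== PORT A =====
-- loop body for `for current_pos in range(floor(len(l)/2))` with break;
-- indexing uses List.getD, exact here since 2*p+1 < l.length for every visited p < ⌊n/2⌋
def pvAGo (l : List Int) : List Nat → Bool
  | [] => true
  | p :: rest =>
    let left := l.getD (2*p + 1) 0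
    let right : Option Int := if 2*p + 2 < l.length then some (l.getD (2*p + 2) 0) else none
    if decide (l.getD p 0 > left) || (match right with
        | some r => decide (l.getD p 0 > r)
        | none => false) then
      false
    else
      pvAGo l rest

def check_list_min_heap (l : List Int) : Bool :=
  pvAGo l (List.range (l.length / 2))

-- ===== PORT B =====
-- `ok(i)`: recursive subtree check; indexing via List.getD is exact since every
-- access is guarded by `< l.length`
def pvBOk (l : List Int) (i : Nat) : Bool :=
  if _h1 : 2*i + 1 < l.length then
    if decide (l.getD i 0 > l.getD (2*i + 1) 0) || !(pvBOk l (2*i + 1)) then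
      false
    else if _h2 : 2*i + 2 < l.length then
      if decide (l.getD i 0 > l.getD (2*i + 2) 0) || !(pvBOk l (2*i + 2)) then
        false
      else true
    else true
  else true
termination_by l.length - i
decreasing_by all_goals omega

def check_list_min_heap_alt (l : List Int) : Bool := pvBOk l 0

-- ===== PRECONDITION & SPEC =====
def Spec_check_list_min_heap (l : List Int) (out : Bool) : Prop := out = check_list_min_heap_alt l
instance (l : List Int) (out : Bool) : Decidable (Spec_check_list_min_heap l out) := by unfold Spec_check_list_min_heap; infer_instance

-- ===== CLAIM (what is proved, stated in full; the proofs are below) =====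
def Claim_equal_check_list_min_heap : Prop := ∀ (l : List Int), Dom_check_list_min_heap l → Spec_check_list_min_heap l (check_list_min_heap l)

-- ===== LEMMAS AND PROOFS =====

-- "k lies in the subtree rooted at i" of the implicit binary tree
inductive PvSub : Nat → Nat → Prop
  | refl (i : Nat) : PvSub i i
  | left {i k : Nat} : PvSub i k → PvSub i (2*k + 1)
  | right {i k : Nat} : PvSub i k → PvSub i (2*k + 2)

-- node k and its in-range children satisfy the min-heap inequality
def pvGood (l : List Int) (k : Nat) : Prop :=
  (2*k + 1 < l.length → l.getD k 0 ≤ l.getD (2*k + 1) 0) ∧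
  (2*k + 2 < l.length → l.getD k 0 ≤ l.getD (2*k + 2) 0)

theorem pvSub_le {i k : Nat} (h : PvSub i k) : i ≤ k := by
  induction h with
  | refl => omega
  | left _ ih => omega
  | right _ ih => omega

theorem pvSub_trans {i j k : Nat} (h1 : PvSub i j) (h2 : PvSub j k) : PvSub i k := by
  induction h2 with
  | refl => exact h1
  | left _ ih => exact PvSub.left ih
  | right _ ih => exact PvSub.right ih

theorem pvSub_decomp {i k : Nat} (h : PvSub i k) :
    k = i ∨ PvSub (2*i + 1) k ∨ PvSub (2*i + 2) k := by
  induction h with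
  | refl => exact Or.inl rfl
  | left _ ih =>
    rcases ih with h | h | h
    · subst h; exact Or.inr (Or.inl (PvSub.refl _))
    · exact Or.inr (Or.inl (PvSub.left h))
    · exact Or.inr (Or.inr (PvSub.left h))
  | right _ ih =>
    rcases ih with h | h | h
    · subst h; exact Or.inr (Or.inr (PvSub.refl _))
    · exact Or.inr (Or.inl (PvSub.right h))
    · exact Or.inr (Or.inr (PvSub.right h))

theorem pvSub_zero (k : Nat) : PvSub 0 k := by
  induction k using Nat.strong_induction_on with
  | _ k ih =>
    match k, ih with
    | 0, _ => exact PvSub.refl 0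
    | (k+1), ih =>
      have hp : k / 2 < k + 1 := by omega
      have h := ih (k / 2) hp
      rcases Nat.even_or_odd k with ⟨m, hm⟩ | ⟨m, hm⟩
      · have he : k + 1 = 2 * (k / 2) + 1 := by omega
        rw [he]; exact PvSub.left h
      · have he : k + 1 = 2 * (k / 2) + 2 := by omega
        rw [he]; exact PvSub.right h

-- the case `2*i+1 ≥ l.length` of the main lemma (no child in range: subtree trivially good)
theorem pvBOk_leaf (l : List Int) (i : Nat) (h1 : ¬ 2*i + 1 < l.length) :
    pvBOk l i = true ↔ ∀ k, PvSub i k → pvGood l k := by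
  rw [pvBOk]
  simp only [h1, dite_false]
  constructor
  · intro _ k hk
    rcases pvSub_decomp hk with h | h | h
    · subst h; exact ⟨fun hc => absurd hc h1, fun hc => by omega⟩
    · have := pvSub_le h; exact ⟨fun hc => by omega, fun hc => by omega⟩
    · have := pvSub_le h; exact ⟨fun hc => by omega, fun hc => by omega⟩
  · intro _; trivial

theorem pvBOk_iff (l : List Int) :
    ∀ m i, l.length - i ≤ m → (pvBOk l i = true ↔ ∀ k, PvSub i k → pvGood l k) := by
  intro m
  induction m with
  | zero =>
    intro i hi
    exact pvBOk_leaf l i (by omega)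
  | succ m ih =>
    intro i hi
    by_cases h1 : 2*i + 1 < l.length
    · rw [pvBOk]
      simp only [h1, dite_true]
      have ihL := ih (2*i + 1) (by omega)
      by_cases c1 : l.getD i 0 > l.getD (2*i + 1) 0
      · simp only [c1, decide_true, Bool.true_or, if_true]
        constructor
        · intro hf; exact absurd hf (by simp)
        · intro hall
          have := (hall i (PvSub.refl i)).1 h1
          omega
      · by_cases cL : pvBOk l (2*i + 1) = true
        · simp only [c1, cL, decide_false, Bool.not_true, Bool.false_or, if_false,
            Bool.false_eq_true]
          by_cases h2 : 2*i + 2 < l.length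
          · simp only [h2, dite_true]
            have ihR := ih (2*i + 2) (by omega)
            by_cases c2 : l.getD i 0 > l.getD (2*i + 2) 0
            · simp only [c2, decide_true, Bool.true_or, if_true]
              constructor
              · intro hf; exact absurd hf (by simp)
              · intro hall
                have := (hall i (PvSub.refl i)).2 h2
                omega
            · by_cases cR : pvBOk l (2*i + 2) = true
              · simp only [c2, cR, decide_false, Bool.not_true, Bool.false_or, if_false,
                  Bool.false_eq_true]
                constructor
                · intro _ k hk
                  rcases pvSub_decomp hk with h | h | h
                  · subst h
                    exact ⟨fun _ => by omega, fun _ => by omega⟩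
                  · exact (ihL.mp cL) k h
                  · exact (ihR.mp cR) k h
                · intro _; trivial
              · have cR' : pvBOk l (2*i + 2) = false := by
                  revert cR; cases pvBOk l (2*i + 2) <;> simp
                simp only [c2, cR', decide_false, Bool.not_false, Bool.false_or, if_true,
                  Bool.false_eq_true]
                constructor
                · intro hf; exact hf.elim
                · intro hall
                  apply cR
                  rw [ihR]
                  intro k hk
                  exact hall k (pvSub_trans (PvSub.right (PvSub.refl i)) hk)
          · simp only [h2, dite_false]
            constructor
            · intro _ k hk
              rcases pvSub_decomp hk with h | h | h
              · subst h
                exact ⟨fun _ => by omega, fun hc => absurd hc h2⟩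
              · exact (ihL.mp cL) k h
              · have := pvSub_le h
                exact ⟨fun hc => by omega, fun hc => by omega⟩
            · intro _; trivial
        · have cL' : pvBOk l (2*i + 1) = false := by
            revert cL; cases pvBOk l (2*i + 1) <;> simp
          simp only [c1, cL', decide_false, Bool.not_false, Bool.false_or, if_true,
            Bool.false_eq_true]
          constructor
          · intro hf; exact hf.elim
          · intro hall
            apply cL
            rw [ihL]
            intro k hk
            exact hall k (pvSub_trans (PvSub.left (PvSub.refl i)) hk)
    · exact pvBOk_leaf l i h1

theorem pvAGo_eq_true (l : List Int) (ps : List Nat) :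
    pvAGo l ps = true ↔
      ∀ p ∈ ps, l.getD p 0 ≤ l.getD (2*p + 1) 0 ∧
        (2*p + 2 < l.length → l.getD p 0 ≤ l.getD (2*p + 2) 0) := by
  induction ps with
  | nil => simp [pvAGo]
  | cons p rest ih =>
    rw [List.forall_mem_cons]
    by_cases hR : 2*p + 2 < l.length
    · simp only [pvAGo, hR, if_pos]
      by_cases h1 : l.getD p 0 > l.getD (2*p + 1) 0
      · simp only [h1, decide_true, Bool.true_or, if_pos]
        constructor
        · intro hf; exact absurd hf (by simp)
        · intro hall; exact absurd hall.1.1 (by omega)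
      · by_cases h2 : l.getD p 0 > l.getD (2*p + 2) 0
        · simp only [h1, h2, decide_true, decide_false, Bool.false_or, if_pos]
          constructor
          · intro hf; exact absurd hf (by simp)
          · intro hall; exact absurd (hall.1.2 trivial) (by omega)
        · simp only [h1, h2, decide_false, Bool.false_or, ite_false, Bool.false_eq_true]
          rw [ih]
          constructor
          · intro hall; exact ⟨⟨by omega, fun _ => by omega⟩, hall⟩
          · intro hall; exact hall.2
    · simp only [pvAGo, hR, if_false]
      by_cases h1 : l.getD p 0 > l.getD (2*p + 1) 0
      · simp only [h1, decide_true, Bool.true_or, if_pos]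
        constructor
        · intro hf; exact absurd hf (by simp)
        · intro hall; exact absurd hall.1.1 (by omega)
      · simp only [h1, decide_false, Bool.false_or, ite_false, Bool.false_eq_true]
        rw [ih]
        constructor
        · intro hall; exact ⟨⟨by omega, fun hc => hc.elim⟩, hall⟩
        · intro hall; exact hall.2

-- ===== VERDICT (by name: the statement is the Claim_ definition above) =====
theorem check_list_min_heap_spec : Claim_equal_check_list_min_heap := by
  intro l _
  unfold Spec_check_list_min_heap check_list_min_heap check_list_min_heap_alt
  rw [Bool.eq_iff_iff, pvAGo_eq_true, pvBOk_iff l l.length 0 (by omega)]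
  simp only [List.mem_range]
  constructor
  · intro hA k _
    constructor
    · intro hc
      exact (hA k (by omega)).1
    · intro hc
      exact (hA k (by omega)).2 hc
  · intro hB p hp
    have hg := hB p (pvSub_zero p)
    exact ⟨hg.1 (by omega), hg.2⟩
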